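-- pv_equiv track=rewrite | github.com/SuyeonYun/CodingTest-Practice | Python3/프로그래머스/2/42586. 기능개발/기능개발.py | solution
-- ===== SOURCE A (Python) =====
-- def solution(progresses, speeds):
--     days = []
--     answer = []
--
--     for p, s in zip(progresses, speeds):
--         temp = (100 - p) % s
--         if temp == 0:
--             days.append((100 - p) // s)
--         else:
--             days.append((100 - p) // s + 1)
--
--     while len(days) != 0:
--         first = days.pop(0)
--         count = 1
--         for day in days:
--             if day > first:
--                 break
--             count += 1
--         answer.append(count)
--         if count > 1:
--             for _ in range(1, count):
--                 days.pop(0)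
--
--     return answer
-- ===== SOURCE B (Python) =====
-- def solution(progresses, speeds):
--     answer = []
--     cur_first = None   # first (largest-allowed) finish day of the current group
--     count = 0
--     for p, s in zip(progresses, speeds):
--         d = -((p - 100) // s)  # ceil((100 - p) / s)
--         if cur_first is None or d > cur_first:
--             if count:
--                 answer.append(count)
--             cur_first = d
--             count = 1
--         else:
--             count += 1
--     if count:
--         answer.append(count)
--     return answer
-- ===== Notes on version B (the rewrite author's own statement) =====
-- stated objective: faster
-- what changed: Replaced the pop(0)-based while loop (rescan and repeated O(n) pops per group) by a single forward pass that keeps the current group's first finish day and a running count, flushing the count when a later day exceeds it; days are computed with ceiling division -((p-100)//s) instead of a mod test plus branch.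
import Mathlib
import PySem

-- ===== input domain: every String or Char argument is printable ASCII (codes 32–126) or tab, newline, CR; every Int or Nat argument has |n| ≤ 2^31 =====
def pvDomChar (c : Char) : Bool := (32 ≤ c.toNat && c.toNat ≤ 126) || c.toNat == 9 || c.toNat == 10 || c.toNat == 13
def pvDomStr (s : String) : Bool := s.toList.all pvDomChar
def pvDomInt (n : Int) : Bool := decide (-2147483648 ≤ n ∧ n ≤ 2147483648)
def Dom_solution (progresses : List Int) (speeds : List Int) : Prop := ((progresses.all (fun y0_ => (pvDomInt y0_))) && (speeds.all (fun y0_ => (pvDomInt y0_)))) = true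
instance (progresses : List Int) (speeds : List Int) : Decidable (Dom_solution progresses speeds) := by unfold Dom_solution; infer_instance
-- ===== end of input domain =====

-- B replaces A's quadratic pop(0) grouping loop by one forward pass keeping the current
-- group's first finish day and a running count (and computes days by ceiling division):
-- O(n) instead of O(n^2).

-- ===== PORT A =====
-- first for-loop of A: build the days list from the zipped pairs
def buildDays : List (Int × Int) → List Int
  | [] => []
  | (p, s) :: rest =>
      let temp := PySem.Int.mod (100 - p) s
      (if temp = 0 then PySem.Int.floordiv (100 - p) s
       else PySem.Int.floordiv (100 - p) s + 1) :: buildDays rest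

-- inner 'for day in days' loop: Python's count is 1 + this leading count of days ≤ first
def cntLe (first : Int) : List Int → Nat
  | [] => 0
  | d :: ds => if d > first then 0 else cntLe first ds + 1

theorem cntLe_le (first : Int) (L : List Int) : cntLe first L ≤ L.length := by
  induction L with
  | nil => simp [cntLe]
  | cons d ds ih => simp only [cntLe, List.length_cons]; split <;> omega

-- the while loop: pop first, count = 1 + cntLe, append count, pop the counted tail
def whileDays : List Int → List Int → List Int
  | [], answer => answer
  | first :: rest, answer =>
      let k := cntLe first rest
      whileDays (rest.drop k) (answer ++ [(1 + (k : Int))])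
termination_by L _ => L.length
decreasing_by
  simp only [List.length_drop, List.length_cons]
  have := cntLe_le first rest
  omega

def solution (progresses : List Int) (speeds : List Int) : List Int :=
  whileDays (buildDays (progresses.zip speeds)) []

-- ===== PORT B =====
-- one step of Source B's for loop: state (answer, cur_first, count)
def stepB (st : List Int × Option Int × Int) (ps : Int × Int) : List Int × Option Int × Int :=
  let d := -(PySem.Int.floordiv (ps.1 - 100) ps.2)
  match st with
  | (answer, curFirst, count) =>
    match curFirst with
    | none => ((if count ≠ 0 then answer ++ [count] else answer), some d, 1)
    | some m =>
        if d > m then ((if count ≠ 0 then answer ++ [count] else answer), some d, 1)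
        else (answer, some m, count + 1)

def solution_alt (progresses : List Int) (speeds : List Int) : List Int :=
  match (progresses.zip speeds).foldl stepB ([], none, 0) with
  | (answer, _, count) => if count ≠ 0 then answer ++ [count] else answer

-- ===== PRECONDITION & SPEC =====
-- Pre_ excludes exactly the inputs where A raises ZeroDivisionError: a zipped speed of 0.
def Pre_solution (progresses : List Int) (speeds : List Int) : Prop :=
  ∀ pr ∈ progresses.zip speeds, pr.2 ≠ 0
instance (progresses : List Int) (speeds : List Int) : Decidable (Pre_solution progresses speeds) := by unfold Pre_solution; infer_instance

def pvWitness_solution : List Int × List Int := ([93, 30, 55], [1, 30, 5])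

def Spec_solution (progresses : List Int) (speeds : List Int) (out : List Int) : Prop := out = solution_alt progresses speeds
instance (progresses : List Int) (speeds : List Int) (out : List Int) : Decidable (Spec_solution progresses speeds out) := by unfold Spec_solution; infer_instance

-- ===== CLAIM (what is proved, stated in full; the proofs are below) =====
def Claim_equal_solution : Prop := ∀ (progresses : List Int) (speeds : List Int), Dom_solution progresses speeds → Pre_solution progresses speeds → Spec_solution progresses speeds (solution progresses speeds)

-- ===== LEMMAS AND PROOFS =====

-- the day value B computes from a pair
def dayOf (ps : Int × Int) : Int := -(PySem.Int.floordiv (ps.1 - 100) ps.2)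

-- day-level step: stepB after the day has been computed
def stepD (st : List Int × Option Int × Int) (d : Int) : List Int × Option Int × Int :=
  match st with
  | (answer, curFirst, count) =>
    match curFirst with
    | none => ((if count ≠ 0 then answer ++ [count] else answer), some d, 1)
    | some m =>
        if d > m then ((if count ≠ 0 then answer ++ [count] else answer), some d, 1)
        else (answer, some m, count + 1)

theorem stepB_eq_stepD (st : List Int × Option Int × Int) (ps : Int × Int) :
    stepB st ps = stepD st (dayOf ps) := by
  rcases st with ⟨a, c, k⟩
  simp [stepB, stepD, dayOf]

-- ceiling-division identity for a positive divisor
theorem ceil_eq_pos (a b : Int) (hb : 0 < b) :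
    (if PySem.Int.mod a b = 0 then PySem.Int.floordiv a b
     else PySem.Int.floordiv a b + 1) = -(PySem.Int.floordiv (-a) b) := by
  rw [eq_comm]
  by_cases h : PySem.Int.mod a b = 0
  · simp only [h, if_pos]
    have hqa := PySem.Int.floordiv_mul_add_mod a b
    rw [h] at hqa
    rw [PySem.Int.neg_floordiv_neg_eq_iff_of_pos hb]
    constructor
    · nlinarith
    · nlinarith
  · simp only [h, if_neg, not_false_iff]
    have hqa := PySem.Int.floordiv_mul_add_mod a b
    have h1 := PySem.Int.mod_nonneg a hb
    have h2 := PySem.Int.mod_lt a hb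
    have h3 : 0 < PySem.Int.mod a b := lt_of_le_of_ne h1 (Ne.symm h)
    rw [PySem.Int.neg_floordiv_neg_eq_iff_of_pos hb]
    constructor
    · nlinarith
    · nlinarith

-- general case: any nonzero divisor
theorem day_eq (p s : Int) (hs : s ≠ 0) :
    (if PySem.Int.mod (100 - p) s = 0 then PySem.Int.floordiv (100 - p) s
     else PySem.Int.floordiv (100 - p) s + 1) = dayOf (p, s) := by
  unfold dayOf
  rcases lt_or_gt_of_ne hs with hneg | hpos
  · have e1 : PySem.Int.floordiv (100 - p) s = PySem.Int.floordiv (-(100 - p)) (-s) := by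
      rw [PySem.Int.floordiv_neg_neg]
    have e2 : PySem.Int.mod (100 - p) s = -(PySem.Int.mod (-(100 - p)) (-s)) := by
      rw [PySem.Int.mod_neg_neg]; ring
    have e3 : PySem.Int.floordiv (p - 100) s = PySem.Int.floordiv (-(p - 100)) (-s) := by
      rw [PySem.Int.floordiv_neg_neg]
    rw [e1, e2, e3]
    have h100 : -(100 - p) = p - 100 := by ring
    have h100' : -(p - 100) = -(p - 100) := rfl
    rw [h100]
    have := ceil_eq_pos (p - 100) (-s) (by omega)
    simp only [neg_eq_zero] at *
    convert this using 2
  · exact (by simpa using ceil_eq_pos (100 - p) s hpos)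

theorem buildDays_eq_map (zs : List (Int × Int)) (h : ∀ pr ∈ zs, pr.2 ≠ 0) :
    buildDays zs = zs.map dayOf := by
  induction zs with
  | nil => rfl
  | cons ps rest ih =>
    rcases ps with ⟨p, s⟩
    have hs : s ≠ 0 := h (p, s) (List.mem_cons_self ..)
    simp only [buildDays, List.map_cons]
    rw [day_eq p s hs, ih (fun pr hm => h pr (List.mem_cons_of_mem _ hm))]

-- the flush at the end of Source B
def finishB (st : List Int × Option Int × Int) : List Int :=
  match st with
  | (answer, _, count) => if count ≠ 0 then answer ++ [count] else answer

-- the core invariant: running B's day-level fold from a live group (first m, count c > 0)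
-- produces exactly what A's while loop produces after finishing that group
theorem run_eq (L : List Int) : ∀ (m c : Int) (acc : List Int), 0 < c →
    finishB (L.foldl stepD (acc, some m, c)) =
      whileDays (L.drop (cntLe m L)) (acc ++ [c + (cntLe m L : Int)]) := by
  induction L with
  | nil =>
    intro m c acc hc
    simp [finishB, cntLe, whileDays]
    omega
  | cons d L' ih =>
    intro m c acc hc
    by_cases hd : d > m
    · have hcnt : cntLe m (d :: L') = 0 := by simp [cntLe, hd]
      have hst : stepD (acc, some m, c) d = (acc ++ [c], some d, 1) := by
        simp [stepD, hd]; omega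
      rw [hcnt]
      simp only [List.foldl_cons, hst, List.drop_zero]
      rw [ih d 1 (acc ++ [c]) (by omega)]
      simp only [whileDays]
      rw [List.append_assoc]
      norm_num
    · have hcnt : cntLe m (d :: L') = cntLe m L' + 1 := by simp [cntLe, hd]
      have hst : stepD (acc, some m, c) d = (acc, some m, c + 1) := by
        simp [stepD, hd]
      rw [hcnt]
      simp only [List.foldl_cons, hst]
      rw [ih m (c + 1) acc (by omega)]
      have hdrop : (d :: L').drop (cntLe m L' + 1) = L'.drop (cntLe m L') := by
        simp [List.drop_succ_cons]
      rw [hdrop]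
      congr 2
      push_cast
      ring_nf

theorem main_eq (L : List Int) :
    finishB (L.foldl stepD ([], none, 0)) = whileDays L [] := by
  cases L with
  | nil => simp [finishB, whileDays]
  | cons d L' =>
    have hst : stepD (([] : List Int), (none : Option Int), (0 : Int)) d = ([], some d, 1) := by
      simp [stepD]
    simp only [List.foldl_cons, hst]
    rw [run_eq L' d 1 [] (by omega)]
    simp [whileDays]

-- ===== VERDICT (by name: the statement is the Claim_ definition above) =====
theorem solution_spec : Claim_equal_solution := by
  intro progresses speeds _hdom hpre
  unfold Spec_solution solution solution_alt
  rw [buildDays_eq_map _ hpre, ← main_eq]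
  have hfold : (progresses.zip speeds).foldl stepB ([], none, 0)
      = ((progresses.zip speeds).map dayOf).foldl stepD ([], none, 0) := by
    rw [List.foldl_map]
    exact List.foldl_ext _ _ _ (fun st ps _ => stepB_eq_stepD st ps)
  rw [hfold]
  rfl
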